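-- pv_equiv track=rewrite | github.com/CatalaLang/catala | runtimes/python/catala/src/catala/runtime.py | handle_default_opt
-- ===== SOURCE A (Python) =====
-- from typing import NewType, List, Callable, Tuple, Optional, TypeVar, Iterable, Union, Any
--
-- Alpha = TypeVar('Alpha')
--
-- class ConflictError(Exception):
--     pass
--
-- def handle_default_opt(
--     exceptions: List[Optional[Any]],
--     just: Optional[bool],
--     cons: Optional[Alpha]
-- ) -> Optional[Alpha]:
--     acc: Optional[Alpha] = None
--     for exception in exceptions:
--         if acc is None:
--             acc = exception
--         elif not (acc is None) and exception is None:
--             pass  # acc stays the same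
--         elif not (acc is None) and not (exception is None):
--             raise ConflictError
--     if acc is None:
--         if just is None:
--             return None
--         else:
--             if just:
--                 return cons
--             else:
--                 return None
--     else:
--         return acc
-- ===== SOURCE B (Python) =====
-- from typing import List, Optional, TypeVar, Any
--
-- Alpha = TypeVar('Alpha')
--
-- class ConflictError(Exception):
--     pass
--
-- def handle_default_opt(
--     exceptions: List[Optional[Any]],
--     just: Optional[bool],
--     cons: Optional[Alpha]
-- ) -> Optional[Alpha]:
--     found = [e for e in exceptions if e is not None]
--     if len(found) >= 2:
--         raise ConflictError
--     if len(found) == 1: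
--         return found[0]
--     return cons if just else None
-- ===== Notes on version B (the rewrite author's own statement) =====
-- stated objective: simpler
-- what changed: Replaces the stateful accumulator scan with early raise by a collect-then-branch structure: filter the non-None exceptions once, then dispatch on the count (>=2 raise, ==1 return it, else fallback via truthiness of just).
import Mathlib
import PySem

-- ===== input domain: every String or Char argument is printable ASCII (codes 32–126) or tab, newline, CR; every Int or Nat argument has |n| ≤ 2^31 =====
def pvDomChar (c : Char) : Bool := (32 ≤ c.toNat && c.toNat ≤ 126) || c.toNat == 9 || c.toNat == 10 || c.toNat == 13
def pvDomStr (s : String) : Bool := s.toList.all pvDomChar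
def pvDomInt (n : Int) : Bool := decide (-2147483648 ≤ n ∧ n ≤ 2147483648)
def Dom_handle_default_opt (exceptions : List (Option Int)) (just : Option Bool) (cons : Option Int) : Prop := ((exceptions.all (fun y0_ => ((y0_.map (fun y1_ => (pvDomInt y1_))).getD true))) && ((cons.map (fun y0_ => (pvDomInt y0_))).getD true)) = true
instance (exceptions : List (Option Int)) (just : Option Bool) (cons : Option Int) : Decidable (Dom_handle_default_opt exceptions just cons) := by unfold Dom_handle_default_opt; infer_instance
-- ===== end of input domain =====

-- B replaces A's stateful accumulator-with-early-raise scan by filter-then-branch-on-count: simpler decomposition, same cost.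
-- Pre_ excludes inputs with two or more non-None exceptions, on which both A and B raise ConflictError.


-- ===== PORT A =====
-- A's for-loop over `exceptions` with accumulator `acc`; `none` result of the
-- helper models `raise ConflictError` (those inputs are excluded by Pre_).
def hdoLoop : List (Option Int) → Option Int → Option (Option Int)
  | [], acc => some acc
  | e :: rest, acc =>
    if acc = none then hdoLoop rest e
    else if e = none then hdoLoop rest acc
    else none

def handle_default_opt (exceptions : List (Option Int)) (just : Option Bool) (cons : Option Int) : Option Int :=
  match hdoLoop exceptions none with
  | none => none   -- ConflictError raised: outside Pre_, value irrelevant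
  | some acc =>
    match acc with
    | none =>
      match just with
      | none => none
      | some j => if j then cons else none
    | some v => some v

-- ===== PORT B =====
def handle_default_opt_alt (exceptions : List (Option Int)) (just : Option Bool) (cons : Option Int) : Option Int :=
  let found := exceptions.filter (fun e => e.isSome)
  if 2 ≤ found.length then none   -- ConflictError raised: outside Pre_, value irrelevant
  else if found.length = 1 then found.getD 0 none
  else if just = some true then cons else none

-- ===== PRECONDITION & SPEC =====
-- Pre_ excludes exactly the inputs with ≥ 2 non-None exceptions, on which A raises ConflictError.
def Pre_handle_default_opt (exceptions : List (Option Int)) (just : Option Bool) (cons : Option Int) : Prop :=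
  exceptions.countP (fun e => e.isSome) ≤ 1
instance (exceptions : List (Option Int)) (just : Option Bool) (cons : Option Int) : Decidable (Pre_handle_default_opt exceptions just cons) := by unfold Pre_handle_default_opt; infer_instance

def pvWitness_handle_default_opt : List (Option Int) × Option Bool × Option Int := ([none, some 3, none], some true, some 7)

def Spec_handle_default_opt (exceptions : List (Option Int)) (just : Option Bool) (cons : Option Int) (out : Option Int) : Prop := out = handle_default_opt_alt exceptions just cons
instance (exceptions : List (Option Int)) (just : Option Bool) (cons : Option Int) (out : Option Int) : Decidable (Spec_handle_default_opt exceptions just cons out) := by unfold Spec_handle_default_opt; infer_instance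

-- ===== CLAIM (what is proved, stated in full; the proofs are below) =====
def Claim_equal_handle_default_opt : Prop := ∀ (exceptions : List (Option Int)) (just : Option Bool) (cons : Option Int), Dom_handle_default_opt exceptions just cons → Pre_handle_default_opt exceptions just cons → Spec_handle_default_opt exceptions just cons (handle_default_opt exceptions just cons)

-- ===== LEMMAS AND PROOFS =====

-- If no non-None elements remain, the loop keeps a non-None accumulator.
theorem hdoLoop_none_count (xs : List (Option Int)) (v : Int)
    (h : xs.countP (fun e => e.isSome) = 0) : hdoLoop xs (some v) = some (some v) := by
  induction xs with
  | nil => rfl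
  | cons e rest ih =>
    rw [List.countP_cons] at h
    cases e with
    | none => simpa [hdoLoop] using ih (by omega)
    | some w => simp at h

-- Under Pre_, the loop from acc = none returns the first non-None exception (or none).
theorem hdoLoop_char (xs : List (Option Int))
    (h : xs.countP (fun e => e.isSome) ≤ 1) :
    hdoLoop xs none = some ((xs.filter (fun e => e.isSome)).getD 0 none) := by
  induction xs with
  | nil => rfl
  | cons e rest ih =>
    rw [List.countP_cons] at h
    cases e with
    | none =>
      simpa [hdoLoop, List.filter] using ih (by omega)
    | some w =>
      have hrest : rest.countP (fun e => e.isSome) = 0 := by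
        simp at h
        rw [List.countP_eq_zero]; intro a ha; simp [h a ha]
      simp [hdoLoop, List.filter, hdoLoop_none_count rest w hrest]

theorem filter_len_le (xs : List (Option Int))
    (h : xs.countP (fun e => e.isSome) ≤ 1) :
    (xs.filter (fun e => e.isSome)).length ≤ 1 := by
  rw [← List.countP_eq_length_filter]; exact h

theorem filter_mem_isSome (xs : List (Option Int)) (y : Option Int)
    (hy : y ∈ xs.filter (fun e => e.isSome)) : y.isSome := by
  have := List.of_mem_filter hy
  simpa using this

-- ===== VERDICT (by name: the statement is the Claim_ definition above) =====
theorem handle_default_opt_spec : Claim_equal_handle_default_opt := by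
  intro exceptions just cons _ hpre
  unfold Spec_handle_default_opt handle_default_opt handle_default_opt_alt
  rw [hdoLoop_char exceptions hpre]
  have hlen := filter_len_le exceptions hpre
  cases hfl : exceptions.filter (fun e => e.isSome) with
  | nil =>
    cases just with
    | none => simp
    | some j => cases j <;> simp
  | cons y ys =>
    have hy : y.isSome := filter_mem_isSome exceptions y (by rw [hfl]; exact List.mem_cons_self ..)
    rw [hfl] at hlen
    have hys : ys = [] := by
      cases ys with
      | nil => rfl
      | cons _ _ => simp at hlen
    subst hys
    cases y with
    | none => simp at hy
    | some v => simp
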